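-- pv_equiv track=rewrite | github.com/Gyaha/AOC2015 | day15.py | rate_cookie
-- ===== SOURCE A (Python) =====
-- def rate_cookie(rules: list, amounts: list) -> int:
--     t = 1
--     for p in range(4):
--         pp = rate_prop(rules, p, amounts)
--         if pp <= 0:
--             return 0
--         t *= pp
--     return t
--
-- def rate_prop(rules: list, prop: int, amounts: list):
--     t = 0
--     for i in range(len(amounts)):
--         t += amounts[i] * rules[i][prop]
--     return t
-- ===== SOURCE B (Python) =====
-- def rate_cookie(rules: list, amounts: list) -> int:
--     # One pass over the ingredients, keeping four running property totals.
--     t0 = t1 = t2 = t3 = 0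
--     for a, r in zip(amounts, rules):
--         t0 += a * r[0]
--         t1 += a * r[1]
--         t2 += a * r[2]
--         t3 += a * r[3]
--     if t0 <= 0 or t1 <= 0 or t2 <= 0 or t3 <= 0:
--         return 0
--     return t0 * t1 * t2 * t3
-- ===== Notes on version B (the rewrite author's own statement) =====
-- stated objective: alternative
-- what changed: Inverted the loop nesting: instead of four property-wise scans (rate_prop) with an inter-property early exit, B makes one ingredient-wise pass over zip(amounts, rules) maintaining four running totals, then returns 0 if any total is <= 0 else their product.
-- outside the precondition, e.g. on rate_cookie([[-1]], [1]): A returns 0, B raises IndexError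
import Mathlib
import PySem

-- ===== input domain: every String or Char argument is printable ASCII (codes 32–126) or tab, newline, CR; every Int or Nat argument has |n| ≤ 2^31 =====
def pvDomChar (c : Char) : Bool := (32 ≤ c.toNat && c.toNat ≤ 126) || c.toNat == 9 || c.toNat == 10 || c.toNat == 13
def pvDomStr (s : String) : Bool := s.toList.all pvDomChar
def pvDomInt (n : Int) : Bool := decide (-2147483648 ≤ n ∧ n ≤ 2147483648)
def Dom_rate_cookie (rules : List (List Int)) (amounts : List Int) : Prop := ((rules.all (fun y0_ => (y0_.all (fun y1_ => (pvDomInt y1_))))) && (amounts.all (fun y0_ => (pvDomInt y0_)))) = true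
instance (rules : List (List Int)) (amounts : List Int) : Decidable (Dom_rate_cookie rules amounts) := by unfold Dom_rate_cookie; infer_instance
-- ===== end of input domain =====

-- B changes the decomposition: one ingredient-wise pass with four running totals
-- instead of A's four property-wise scans with early exit; same cost, proved equal.

-- ===== PORT A =====
def rate_prop (rules : List (List Int)) (prop : Int) (amounts : List Int) : Int :=
  (PySem.List.pyRange 0 amounts.length 1).foldl
    (fun t i => t + PySem.List.pyGetD amounts i 0 *
                    PySem.List.pyGetD (PySem.List.pyGetD rules i []) prop 0) 0

def rateGo (rules : List (List Int)) (amounts : List Int) : List Int → Int → Int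
  | [], t => t
  | p :: ps, t =>
      let pp := rate_prop rules p amounts
      if pp ≤ 0 then 0 else rateGo rules amounts ps (t * pp)

def rate_cookie (rules : List (List Int)) (amounts : List Int) : Int :=
  rateGo rules amounts (PySem.List.pyRange 0 4 1) 1

-- ===== PORT B =====
def rate_cookie_alt (rules : List (List Int)) (amounts : List Int) : Int :=
  let s := (amounts.zip rules).foldl
    (fun (s : Int × Int × Int × Int) (ar : Int × List Int) =>
      (s.1 + ar.1 * PySem.List.pyGetD ar.2 0 0,
       s.2.1 + ar.1 * PySem.List.pyGetD ar.2 1 0,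
       s.2.2.1 + ar.1 * PySem.List.pyGetD ar.2 2 0,
       s.2.2.2 + ar.1 * PySem.List.pyGetD ar.2 3 0)) (0, 0, 0, 0)
  if s.1 ≤ 0 ∨ s.2.1 ≤ 0 ∨ s.2.2.1 ≤ 0 ∨ s.2.2.2 ≤ 0 then 0
  else s.1 * s.2.1 * s.2.2.1 * s.2.2.2

-- ===== PRECONDITION & SPEC =====
-- A raises IndexError when rules is shorter than amounts or (except when an
-- earlier property total already triggered the early 0-return) some used rule
-- row lacks all four entries; Pre_ excludes all such inputs, including the
-- early-exit ones on which A still returns 0 while B reads all four entries.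
def Pre_rate_cookie (rules : List (List Int)) (amounts : List Int) : Prop :=
  amounts.length ≤ rules.length ∧
  ∀ r ∈ rules.take amounts.length, 4 ≤ r.length
instance (rules : List (List Int)) (amounts : List Int) : Decidable (Pre_rate_cookie rules amounts) := by
  unfold Pre_rate_cookie; infer_instance
def pvWitness_rate_cookie : List (List Int) × List Int := ([[1, 2, 3, 4]], [2])

def Spec_rate_cookie (rules : List (List Int)) (amounts : List Int) (out : Int) : Prop := out = rate_cookie_alt rules amounts
instance (rules : List (List Int)) (amounts : List Int) (out : Int) : Decidable (Spec_rate_cookie rules amounts out) := by unfold Spec_rate_cookie; infer_instance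

-- ===== CLAIM (what is proved, stated in full; the proofs are below) =====
def Claim_equal_rate_cookie : Prop := ∀ (rules : List (List Int)) (amounts : List Int), Dom_rate_cookie rules amounts → Pre_rate_cookie rules amounts → Spec_rate_cookie rules amounts (rate_cookie rules amounts)

-- ===== LEMMAS AND PROOFS =====


def sumP (l : List (Int × List Int)) (p : Int) : Int :=
  (l.map (fun ar => ar.1 * PySem.List.pyGetD ar.2 p 0)).sum

lemma key (p : Int) : ∀ (am : List Int) (ru : List (List Int)) (t : Int),
    am.length ≤ ru.length →
    (List.range am.length).foldl
      (fun acc k => acc + (am[k]?.getD 0) *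
        PySem.List.pyGetD (ru[k]?.getD []) p 0) t
    = t + sumP (am.zip ru) p := by
  intro am
  induction am with
  | nil => intro ru t _; simp [sumP]
  | cons a am ih =>
    intro ru t h
    cases ru with
    | nil => simp at h
    | cons r ru =>
      simp only [List.length_cons, List.range_succ_eq_map, List.foldl_cons,
        List.foldl_map, Nat.succ_eq_add_one, List.getElem?_cons_succ,
        List.getElem?_cons_zero, Option.getD_some]
      rw [ih ru _ (by simpa using h)]
      simp [sumP]
      ring

lemma rate_prop_eq (rules : List (List Int)) (p : Int) (amounts : List Int)
    (h : amounts.length ≤ rules.length) :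
    rate_prop rules p amounts = sumP (amounts.zip rules) p := by
  unfold rate_prop
  rw [PySem.List.pyRange_zero_nat, List.foldl_map]
  simp only [PySem.List.pyGetD_natCast, List.getD]
  simpa using key p amounts rules 0 h

lemma foldB (l : List (Int × List Int)) : ∀ (a b c d : Int),
    l.foldl
      (fun (s : Int × Int × Int × Int) (ar : Int × List Int) =>
        (s.1 + ar.1 * PySem.List.pyGetD ar.2 0 0,
         s.2.1 + ar.1 * PySem.List.pyGetD ar.2 1 0,
         s.2.2.1 + ar.1 * PySem.List.pyGetD ar.2 2 0,
         s.2.2.2 + ar.1 * PySem.List.pyGetD ar.2 3 0)) (a, b, c, d)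
    = (a + sumP l 0, b + sumP l 1, c + sumP l 2, d + sumP l 3) := by
  induction l with
  | nil => intro a b c d; simp [sumP]
  | cons x l ih =>
    intro a b c d
    simp only [List.foldl_cons, ih, sumP, List.map_cons, List.sum_cons]
    refine Prod.ext ?_ (Prod.ext ?_ (Prod.ext ?_ ?_)) <;> simp <;> ring

-- ===== VERDICT (by name: the statement is the Claim_ definition above) =====
theorem rate_cookie_spec : Claim_equal_rate_cookie := by
  intro rules amounts _ hpre
  obtain ⟨hlen, -⟩ := hpre
  unfold Spec_rate_cookie rate_cookie rate_cookie_alt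
  rw [foldB]
  have h0 := rate_prop_eq rules 0 amounts hlen
  have h1 := rate_prop_eq rules 1 amounts hlen
  have h2 := rate_prop_eq rules 2 amounts hlen
  have h3 := rate_prop_eq rules 3 amounts hlen
  have hr : PySem.List.pyRange 0 4 1 = [0, 1, 2, 3] := by decide
  rw [hr]
  simp only [rateGo, h0, h1, h2, h3, zero_add]
  split_ifs with a0 a1 a2 a3 <;> simp_all <;> omega
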